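-- pv_equiv track=rewrite | github.com/bcndev/trezor-core | src/apps/bytecoin/bcncrypto.py | get_varint_size
-- ===== SOURCE A (Python) =====
-- def get_varint_size(n)->int:
--     if n < 0:
--         raise ValueError("get_varint_size(n), n < 0")
--     bts = 0 if n != 0 else 1
--     while n:
--         n >>= 7
--         bts += 1
--     return bts
-- ===== SOURCE B (Python) =====
-- def get_varint_size(n) -> int:
--     if n < 0:
--         raise ValueError("get_varint_size(n), n < 0")
--     if n == 0:
--         return 1
--     return (n.bit_length() + 6) // 7
-- ===== Notes on version B (the rewrite author's own statement) =====
-- stated objective: simpler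
-- what changed: Replaces the shift-and-count while loop with a closed-form arithmetic expression (n.bit_length() + 6) // 7, keeping the n == 0 special case and the negative-input ValueError.
import Mathlib
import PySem

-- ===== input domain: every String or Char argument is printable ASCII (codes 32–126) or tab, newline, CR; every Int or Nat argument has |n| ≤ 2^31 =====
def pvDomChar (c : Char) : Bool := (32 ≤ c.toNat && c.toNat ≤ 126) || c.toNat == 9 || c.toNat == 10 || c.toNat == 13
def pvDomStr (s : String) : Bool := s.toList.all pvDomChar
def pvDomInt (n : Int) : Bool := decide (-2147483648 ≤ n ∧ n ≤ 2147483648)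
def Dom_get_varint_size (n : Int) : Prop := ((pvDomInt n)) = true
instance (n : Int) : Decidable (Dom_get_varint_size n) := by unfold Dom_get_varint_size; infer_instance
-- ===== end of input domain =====

-- B replaces A's shift-and-count loop by the closed form (bit_length + 6) // 7; equal return values on all n ≥ 0 (A raises ValueError on n < 0, excluded by Pre_).
-- ===== PORT A =====
-- while n: n >>= 7; bts += 1   (Pre_ guarantees n ≥ 0, so the loop runs on n.toNat)
def pvLoopA (m : Nat) (bts : Int) : Int :=
  if m = 0 then bts else pvLoopA (m >>> 7) (bts + 1)
termination_by m
decreasing_by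
  simp [Nat.shiftRight_eq_div_pow]; omega

def get_varint_size (n : Int) : Int :=
  pvLoopA n.toNat (if n ≠ 0 then 0 else 1)

-- ===== PORT B =====
-- n.bit_length() for n > 0 is Nat.log2 n + 1
def get_varint_size_alt (n : Int) : Int :=
  if n = 0 then 1 else ((n.toNat.log2 + 1 + 6) / 7 : Nat)

-- ===== PRECONDITION & SPEC =====
-- A raises ValueError on n < 0; Pre_ admits exactly the inputs where A returns.
def Pre_get_varint_size (n : Int) : Prop := 0 ≤ n
instance (n : Int) : Decidable (Pre_get_varint_size n) := by unfold Pre_get_varint_size; infer_instance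
def pvWitness_get_varint_size : Int := (300)

def Spec_get_varint_size (n : Int) (out : Int) : Prop := out = get_varint_size_alt n
instance (n : Int) (out : Int) : Decidable (Spec_get_varint_size n out) := by unfold Spec_get_varint_size; infer_instance

-- ===== CLAIM (what is proved, stated in full; the proofs are below) =====
def Claim_equal_get_varint_size : Prop := ∀ (n : Int), Dom_get_varint_size n → Pre_get_varint_size n → Spec_get_varint_size n (get_varint_size n)

-- ===== LEMMAS AND PROOFS =====

theorem pvLoopA_shift (m : Nat) (b : Int) (h : m ≠ 0) :
    pvLoopA m b = pvLoopA (m / 128) (b + 1) := by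
  rw [pvLoopA]
  simp [h, Nat.shiftRight_eq_div_pow]

theorem pvLoopA_count (m : Nat) (b : Int) (h : 0 < m) :
    pvLoopA m b = b + (m.log2 / 7 + 1 : Nat) := by
  induction m using Nat.strong_induction_on generalizing b with
  | _ m ih =>
    rw [pvLoopA_shift m b (by omega)]
    by_cases h128 : m < 128
    · have hm0 : m / 128 = 0 := by omega
      have hlog : m.log2 ≤ 6 := by
        have := Nat.log2_lt (by omega : m ≠ 0) |>.mpr (by omega : m < 2 ^ 7)
        omega
      rw [hm0, pvLoopA]
      simp
      omega
    · have hdiv : 0 < m / 128 := by omega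
      rw [ih (m / 128) (by omega) (b + 1) hdiv]
      have hlog : (m / 128).log2 = m.log2 - 7 := by
        have : (128 : Nat) = 2 ^ 7 := rfl
        simp only [Nat.log2_eq_log_two] at *
        rw [this, Nat.pow_succ' (n := 6)]
        have e : m / (2 * 2 ^ 6) = m / 2 / 2 / 2 / 2 / 2 / 2 / 2 := by
          omega
        rw [e]
        simp [Nat.log_div_base]
        omega
      have hge : 7 ≤ m.log2 := by
        have : 2 ^ 7 ≤ m := by omega
        have := Nat.log2_self_le (n := m) (by omega)
        exact (Nat.le_log2 (by omega)).mpr (by omega)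
      rw [hlog]
      push_cast
      omega

-- ===== VERDICT (by name: the statement is the Claim_ definition above) =====
theorem get_varint_size_spec : Claim_equal_get_varint_size := by
  intro n _ hpre
  unfold Spec_get_varint_size get_varint_size get_varint_size_alt
  by_cases h0 : n = 0
  · subst h0; rw [pvLoopA]; simp
  · have hpos : 0 < n.toNat := by
      have : 0 < n := lt_of_le_of_ne hpre (Ne.symm h0)
      omega
    rw [if_pos h0, if_neg h0, pvLoopA_count _ _ hpos]
    have : n.toNat.log2 / 7 + 1 = (n.toNat.log2 + 1 + 6) / 7 := by omega
    rw [← this]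
    push_cast
    ring
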